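-- pv_equiv track=rewrite | github.com/PardhuKadali/INNOMATICS_BATCH_225 | leetcodes.py | lc_1859
-- ===== SOURCE A (Python) =====
-- def lc_1859(l):
--     '''
--     A sentence is a list of words that are separated by a single space with no leading or trailing spaces.
--     Each word consists of lowercase and uppercase English letters.
--     A sentence can be shuffled by appending the 1-indexed word position to each word
--     then rearranging the words in the sentence.
--     For example, the sentence "This is a sentence" can be shuffled as "sentence4 a3 is2 This1" or "is2 sentence4 This1 a3".
--     Given a shuffled sentence s containing no more than 9 words, reconstruct and return the original sentence.
--
--     Example 1:
--
--     Input: s = "is2 sentence4 This1 a3"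
--     Output: "This is a sentence"
--     Explanation: Sort the words in s to their original positions "This1 is2 a3 sentence4", then remove the numbers.
--     --------------------------------------------------- Mouni
--     '''
--
--     s = l.split()
--     n = len(s)
--     res = [""] * n
--
--     for i in s:
--         k= int(i[-1])
--         res[k - 1] = i[:-1]
--     return " ".join(res)
-- ===== SOURCE B (Python) =====
-- def lc_1859(l):
--     words = sorted(l.split(), key=lambda w: int(w[-1]))
--     return " ".join(w[:-1] for w in words)
-- ===== Notes on version B (the rewrite author's own statement) =====
-- stated objective: idiomatic
-- what changed: Replaces A's preallocated-array scatter by position index with a sort of the words keyed on int(w[-1]) followed by a join of the digit-stripped words.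
-- outside the precondition, e.g. on lc_1859('a1 b1'): A returns 'b ', B returns 'a b'; on lc_1859('a0 b1'): A returns 'b a', B returns 'a b'
import Mathlib
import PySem

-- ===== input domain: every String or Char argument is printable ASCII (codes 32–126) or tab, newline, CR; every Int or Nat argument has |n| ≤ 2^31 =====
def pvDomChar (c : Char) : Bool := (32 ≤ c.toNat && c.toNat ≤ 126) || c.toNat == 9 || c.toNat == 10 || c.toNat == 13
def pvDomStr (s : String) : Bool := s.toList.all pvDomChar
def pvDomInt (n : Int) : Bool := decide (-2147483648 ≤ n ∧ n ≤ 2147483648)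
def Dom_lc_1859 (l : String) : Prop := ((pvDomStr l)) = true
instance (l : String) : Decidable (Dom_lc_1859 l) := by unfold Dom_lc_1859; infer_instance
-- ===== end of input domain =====

-- B re-implements lc_1859 idiomatically: sort the words by int(w[-1]) and join them digit-stripped,
-- instead of A's scatter into a preallocated array; equivalence proved on valid shuffled sentences.


-- int(w[-1]): the int value of the word's last character; -1 where Python would raise
-- (empty word / non-digit last char — unreachable under Pre_lc_1859)
def pvKey (w : String) : Int :=
  match PySem.Str.pyGet? w (-1) with
  | some c => (PySem.Int.ofChars? [c]).getD (-1)
  | none => -1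

-- ===== PORT A =====
-- s = l.split(); res = [""] * n; for i in s: res[int(i[-1]) - 1] = i[:-1]; return " ".join(res)
def lc_1859 (l : String) : String :=
  let s := PySem.Str.split₀ l
  let n := s.length
  let res : List String := List.replicate n ""
  let res := s.foldl (fun res i => PySem.List.pySetD res (pvKey i - 1) (PySem.Str.slice i none (some (-1)))) res
  PySem.Str.join " " res

-- ===== PORT B =====
-- return " ".join(w[:-1] for w in sorted(l.split(), key=lambda w: int(w[-1])))
def lc_1859_alt (l : String) : String :=
  PySem.Str.join " "
    ((PySem.List.sorted (PySem.Str.split₀ l) pvKey).map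
      (fun w => PySem.Str.slice w none (some (-1))))

-- ===== PRECONDITION & SPEC =====
-- Pre_ admits exactly the valid shuffled sentences: the int values of the words' last characters
-- are exactly the positions 1..n.  Outside it A either raises (non-digit last char, position > n)
-- or returns an accidental value of its scatter (overwrites leaving untouched slots on duplicate positions,
-- negative-index wraparound on a 0 suffix), while B sorts — neither behaviour is specified there.
def Pre_lc_1859 (l : String) : Prop :=
  ((PySem.Str.split₀ l).map pvKey).Perm
    ((List.range (PySem.Str.split₀ l).length).map (fun j : Nat => (j : Int) + 1))
instance (l : String) : Decidable (Pre_lc_1859 l) := by unfold Pre_lc_1859; infer_instance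
def pvWitness_lc_1859 : String := "is2 sentence4 This1 a3"
def Spec_lc_1859 (l : String) (out : String) : Prop := out = lc_1859_alt l
instance (l : String) (out : String) : Decidable (Spec_lc_1859 l out) := by unfold Spec_lc_1859; infer_instance

-- ===== CLAIM (what is proved, stated in full; the proofs are below) =====
def Claim_equal_lc_1859 : Prop := ∀ (l : String), Dom_lc_1859 l → Pre_lc_1859 l → Spec_lc_1859 l (lc_1859 l)

-- ===== LEMMAS AND PROOFS =====

-- the gathered word list: position j (0-based) holds the unique word whose key is j+1
def pvGather (ws : List String) : List String :=
  (List.range ws.length).map (fun j : Nat => (ws.find? (fun w => pvKey w == (j : Int) + 1)).getD "")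

theorem pvGather_getElem (ws : List String) (j : Nat) (hj : j < ws.length)
    (h : j < (pvGather ws).length) :
    (pvGather ws)[j] = (ws.find? (fun w => pvKey w == (j : Int) + 1)).getD "" := by
  simp only [pvGather, List.getElem_map, List.getElem_range]

theorem pvGather_getElem? (ws : List String) (j : Nat) (hj : j < ws.length) :
    (pvGather ws)[j]? = some ((ws.find? (fun w => pvKey w == (j : Int) + 1)).getD "") := by
  have h : j < (pvGather ws).length := by simp [pvGather]; omega
  rw [List.getElem?_eq_getElem h, pvGather_getElem ws j hj h]

-- A's scatter loop, characterised slot by slot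
theorem pv_scatter (n : Nat) (ws : List String)
    (hk : ∀ w ∈ ws, 1 ≤ pvKey w ∧ pvKey w ≤ (n : Int))
    (hnd : (ws.map pvKey).Nodup) :
    ∀ (res : List String), res.length = n →
      (ws.foldl (fun res i => PySem.List.pySetD res (pvKey i - 1) (PySem.Str.slice i none (some (-1)))) res).length = n ∧
      ∀ j, j < n →
        (ws.foldl (fun res i => PySem.List.pySetD res (pvKey i - 1) (PySem.Str.slice i none (some (-1)))) res)[j]? =
          (match ws.find? (fun w => pvKey w == (j : Int) + 1) with
           | some w => some (PySem.Str.slice w none (some (-1)))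
           | none => res[j]?) := by
  induction ws with
  | nil => intro res hlen; exact ⟨hlen, fun j _ => by simp⟩
  | cons w ws ih =>
    intro res hlen
    have hkw : 1 ≤ pvKey w ∧ pvKey w ≤ (n : Int) := hk w (List.mem_cons_self ..)
    have hnotin : pvKey w ∉ ws.map pvKey := (List.nodup_cons.mp hnd).1
    have hnd' : (ws.map pvKey).Nodup := (List.nodup_cons.mp hnd).2
    have hstep : PySem.List.pySetD res (pvKey w - 1) (PySem.Str.slice w none (some (-1)))
        = res.set (pvKey w - 1).toNat (PySem.Str.slice w none (some (-1))) :=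
      PySem.List.pySetD_of_nonneg res _ (by omega)
    have hlen' : (res.set (pvKey w - 1).toNat (PySem.Str.slice w none (some (-1)))).length = n := by
      simp [hlen]
    obtain ⟨ihlen, ihget⟩ := ih (fun x hx => hk x (List.mem_cons_of_mem _ hx)) hnd' _ hlen'
    rw [List.foldl_cons, hstep]
    refine ⟨ihlen, fun j hj => ?_⟩
    rw [ihget j hj]
    by_cases hpw : pvKey w = (j : Int) + 1
    · have hfw : List.find? (fun w => pvKey w == (j : Int) + 1) (w :: ws) = some w := by
        simp [hpw]
      have hfws : List.find? (fun w => pvKey w == (j : Int) + 1) ws = none := by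
        rw [List.find?_eq_none]
        intro x hx hbe
        exact hnotin (by
          have : pvKey x = (j : Int) + 1 := by simpa using hbe
          rw [hpw, ← this]; exact List.mem_map_of_mem hx)
      rw [hfw, hfws]
      have hidx : (pvKey w - 1).toNat = j := by omega
      rw [hidx]
      exact List.getElem?_set_self (by omega)
    · have hfw : List.find? (fun w => pvKey w == (j : Int) + 1) (w :: ws) =
          List.find? (fun w => pvKey w == (j : Int) + 1) ws := by
        simp [hpw]
      rw [hfw]
      cases hws : List.find? (fun w => pvKey w == (j : Int) + 1) ws with
      | some w' => rfl
      | none =>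
        have : (pvKey w - 1).toNat ≠ j := by omega
        exact List.getElem?_set_ne this

theorem pv_find_key (ws : List String) (n : Nat)
    (hpre : (ws.map pvKey).Perm ((List.range n).map (fun j : Nat => (j : Int) + 1)))
    (j : Nat) (hj : j < n) :
    ∃ w, ws.find? (fun w => pvKey w == (j : Int) + 1) = some w ∧ w ∈ ws ∧ pvKey w = (j : Int) + 1 := by
  have hmem : ((j : Int) + 1) ∈ ws.map pvKey := by
    rw [hpre.mem_iff]
    exact List.mem_map.mpr ⟨j, List.mem_range.mpr hj, rfl⟩
  obtain ⟨w, hw, hkey⟩ := List.mem_map.mp hmem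
  have hsome : (ws.find? (fun w => pvKey w == (j : Int) + 1)).isSome := by
    rw [List.find?_isSome]
    exact ⟨w, hw, by simp [hkey]⟩
  obtain ⟨w', hw'⟩ := Option.isSome_iff_exists.mp hsome
  exact ⟨w', hw', List.mem_of_find?_eq_some hw',
    by simpa using List.find?_some hw'⟩

theorem pv_sorted_eq_gather (ws : List String)
    (hpre : (ws.map pvKey).Perm ((List.range ws.length).map (fun j : Nat => (j : Int) + 1))) :
    PySem.List.sorted ws pvKey = pvGather ws := by
  have hnd : (ws.map pvKey).Nodup := by
    refine hpre.nodup_iff.mpr (List.Nodup.map_on ?_ List.nodup_range)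
    intro a _ b _ h
    omega
  have hglen : (pvGather ws).length = ws.length := by simp [pvGather]
  have hg : ∀ j, (hj : j < ws.length) →
      (pvGather ws)[j]'(by omega) ∈ ws ∧ pvKey ((pvGather ws)[j]'(by omega)) = (j : Int) + 1 := by
    intro j hj
    obtain ⟨w, hfind, hwmem, hwkey⟩ := pv_find_key ws ws.length hpre j hj
    have : (pvGather ws)[j]'(by omega) = w := by
      rw [pvGather_getElem ws j hj (by omega)]
      simp [hfind]
    rw [this]
    exact ⟨hwmem, hwkey⟩
  have hpair : (pvGather ws).Pairwise (fun a b => pvKey a < pvKey b) := by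
    rw [List.pairwise_iff_getElem]
    intro i j hi hj hij
    rw [(hg i (by omega)).2, (hg j (by omega)).2]
    omega
  have hgnd : (pvGather ws).Nodup :=
    hpair.imp (fun {a b} h => by intro he; rw [he] at h; exact lt_irrefl _ h)
  have hperm : (pvGather ws).Perm ws := by
    rw [List.perm_ext_iff_of_nodup hgnd (hnd.of_map _)]
    intro a
    constructor
    · intro ha
      obtain ⟨i, hi, heq⟩ := List.mem_iff_getElem.mp ha
      rw [← heq]
      exact (hg i (by omega)).1
    · intro ha
      have hka : 1 ≤ pvKey a ∧ pvKey a ≤ (ws.length : Int) := by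
        have : pvKey a ∈ (List.range ws.length).map (fun j : Nat => (j : Int) + 1) :=
          hpre.mem_iff.mp (List.mem_map_of_mem ha)
        obtain ⟨j, hj, hje⟩ := List.mem_map.mp this
        have := List.mem_range.mp hj
        omega
      have hj : (pvKey a - 1).toNat < ws.length := by omega
      have := hg (pvKey a - 1).toNat hj
      have heqa : (pvGather ws)[(pvKey a - 1).toNat]'(by omega) = a := by
        refine List.inj_on_of_nodup_map hnd this.1 ha ?_
        rw [this.2]
        omega
      rw [← heqa]
      exact List.getElem_mem _
  exact PySem.List.sorted_eq_of_perm_of_pairwise_lt ws (pvGather ws) pvKey hperm hpair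

-- ===== VERDICT (by name: the statement is the Claim_ definition above) =====
set_option maxHeartbeats 1000000 in
theorem lc_1859_spec : Claim_equal_lc_1859 := by
  intro l _ hpre
  unfold Pre_lc_1859 at hpre
  simp only [Spec_lc_1859, lc_1859, lc_1859_alt]
  generalize hws : PySem.Str.split₀ l = ws at hpre ⊢
  have hk : ∀ w ∈ ws, 1 ≤ pvKey w ∧ pvKey w ≤ (ws.length : Int) := by
    intro w hw
    have : pvKey w ∈ (List.range ws.length).map (fun j : Nat => (j : Int) + 1) :=
      hpre.mem_iff.mp (List.mem_map_of_mem hw)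
    obtain ⟨j, hj, hje⟩ := List.mem_map.mp this
    have := List.mem_range.mp hj
    omega
  have hnd : (ws.map pvKey).Nodup := by
    refine hpre.nodup_iff.mpr (List.Nodup.map_on ?_ List.nodup_range)
    intro a _ b _ h
    omega
  obtain ⟨hlen, hget⟩ := pv_scatter ws.length ws hk hnd (List.replicate ws.length "") (by simp)
  rw [pv_sorted_eq_gather ws hpre]
  congr 1
  apply List.ext_getElem?
  intro j
  by_cases hj : j < ws.length
  · rw [hget j hj]
    obtain ⟨w, hfind, _, _⟩ := pv_find_key ws ws.length hpre j hj
    rw [hfind, List.getElem?_map, pvGather_getElem? ws j hj]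
    simp [hfind]
  · rw [List.getElem?_eq_none (by omega), List.getElem?_eq_none (by simp [pvGather]; omega)]
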